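-- pv_equiv track=rewrite | github.com/Farshid-Ahmadi/firestationbalebot | online_admin.py | split_history_entries
-- ===== SOURCE A (Python) =====
-- def split_history_entries(content: str):
--     entries = []
--     current = []
--     for line in content.splitlines():
--         if line.strip() == "----------":
--             block = "\n".join(current).strip()
--             if block:
--                 entries.append(block)
--             current = []
--         else:
--             current.append(line)
--     block = "\n".join(current).strip()
--     if block:
--         entries.append(block)
--     return entries
-- ===== SOURCE B (Python) =====
-- def split_history_entries(content: str):
--     lines = content.splitlines()
--     bounds = [i for i, l in enumerate(lines) if l.strip() == "----------"]
--     starts = [0] + [i + 1 for i in bounds]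
--     stops = bounds + [len(lines)]
--     blocks = ["\n".join(lines[a:b]).strip() for a, b in zip(starts, stops)]
--     return [b for b in blocks if b]
-- ===== Notes on version B (the rewrite author's own statement) =====
-- stated objective: alternative
-- what changed: Replaces A's single-pass stateful flush/reset accumulator loop with a staged index-based pipeline: first collect all separator line positions, derive start/stop boundary lists, then slice the line list between consecutive boundaries, join, strip and keep the non-empty blocks.
import Mathlib
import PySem

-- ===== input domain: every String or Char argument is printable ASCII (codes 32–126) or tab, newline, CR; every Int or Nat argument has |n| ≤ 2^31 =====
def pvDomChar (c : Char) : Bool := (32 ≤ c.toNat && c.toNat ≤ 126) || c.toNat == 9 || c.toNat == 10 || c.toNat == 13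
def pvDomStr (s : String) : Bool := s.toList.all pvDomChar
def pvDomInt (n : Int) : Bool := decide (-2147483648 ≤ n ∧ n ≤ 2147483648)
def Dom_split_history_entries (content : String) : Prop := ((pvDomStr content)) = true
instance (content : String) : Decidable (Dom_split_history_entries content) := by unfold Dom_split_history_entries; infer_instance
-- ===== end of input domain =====

-- B replaces A's single-pass flush/reset accumulator loop with a staged, index-based
-- pipeline: first collect all separator positions, then slice the line list between
-- consecutive boundaries and keep the non-empty stripped joins; objective: alternative, same cost.

-- ===== PORT A =====
-- loop body of A's for-loop over lines, state = (entries, current)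
def pvStepA (st : List String × List String) (line : String) : List String × List String :=
  if PySem.Str.strip line = "----------" then
    let block := PySem.Str.strip (PySem.Str.join "\n" st.2)
    (if block ≠ "" then st.1 ++ [block] else st.1, [])
  else
    (st.1, st.2 ++ [line])

-- A's trailing flush after the loop
def pvFinishA (st : List String × List String) : List String :=
  let block := PySem.Str.strip (PySem.Str.join "\n" st.2)
  if block ≠ "" then st.1 ++ [block] else st.1

def split_history_entries (content : String) : List String :=
  pvFinishA ((PySem.Str.splitlines content).foldl pvStepA ([], []))

-- ===== PORT B =====
-- B's staged pipeline over the line list (Source B's body after lines = content.splitlines()):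
-- bounds = separator indices, starts/stops = boundary lists, blocks = joined slices, filter truthy
def pvB (lines : List String) : List String :=
  let bounds := ((PySem.List.enumerate lines 0).filter
      (fun p => decide (PySem.Str.strip p.2 = "----------"))).map (fun p => p.1)
  let starts := 0 :: bounds.map (· + 1)
  let stops := bounds ++ [(lines.length : Int)]
  let blocks := (starts.zip stops).map
      (fun p => PySem.Str.strip (PySem.Str.join "\n" (PySem.List.slice lines (some p.1) (some p.2))))
  blocks.filter (fun b => decide (b ≠ ""))

def split_history_entries_alt (content : String) : List String :=
  pvB (PySem.Str.splitlines content)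

-- ===== PRECONDITION & SPEC =====
def Spec_split_history_entries (content : String) (out : List String) : Prop := out = split_history_entries_alt content
instance (content : String) (out : List String) : Decidable (Spec_split_history_entries content out) := by unfold Spec_split_history_entries; infer_instance

-- ===== CLAIM (what is proved, stated in full; the proofs are below) =====
def Claim_equal_split_history_entries : Prop := ∀ (content : String), Dom_split_history_entries content → Spec_split_history_entries content (split_history_entries content)

-- ===== LEMMAS AND PROOFS =====

def pvSep (l : String) : Bool := decide (PySem.Str.strip l = "----------")

-- joined-and-stripped block of a chunk, kept iff non-empty
def pvFlush (c : List String) : List String :=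
  let block := PySem.Str.strip (PySem.Str.join "\n" c)
  if block ≠ "" then [block] else []

-- A's loop, recursively, trailing flush fused in
def pvRunA : List String → List String → List String
  | [], c => pvFlush c
  | l :: ls, c =>
    if pvSep l then pvFlush c ++ pvRunA ls []
    else pvRunA ls (c ++ [l])

-- separator indices of ls counting from s  (B's bounds with a start offset)
def pvE (s : Int) (ls : List String) : List Int :=
  ((PySem.List.enumerate ls s).filter (fun p => pvSep p.2)).map (fun p => p.1)

theorem pvFinishA_foldl (ls : List String) : ∀ e c,
    pvFinishA (ls.foldl pvStepA (e, c)) = e ++ pvRunA ls c := by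
  induction ls with
  | nil =>
    intro e c
    simp only [List.foldl_nil, pvFinishA, pvRunA, pvFlush]
    split_ifs <;> simp
  | cons l ls ih =>
    intro e c
    simp only [List.foldl_cons, pvRunA]
    by_cases h : pvSep l
    · have h' : PySem.Str.strip l = "----------" := by simpa [pvSep] using h
      simp only [pvStepA, h', if_pos, h]
      rw [ih]
      simp only [pvFlush]
      split_ifs <;> simp
    · have h' : ¬ PySem.Str.strip l = "----------" := by simpa [pvSep] using h
      simp only [pvStepA, h', ite_false, h]
      exact ih e (c ++ [l])

theorem pvRunA_prefix : ∀ (c : List String), (∀ l ∈ c, pvSep l = false) →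
    ∀ ls acc, pvRunA (c ++ ls) acc = pvRunA ls (acc ++ c) := by
  intro c
  induction c with
  | nil => intro _ ls acc; simp
  | cons y c' ih =>
    intro h ls acc
    have hy : pvSep y = false := h y (by simp)
    simp only [List.cons_append, pvRunA, hy, Bool.false_eq_true, if_false]
    rw [ih (fun l hl => h l (by simp [hl])) ls]
    simp

theorem pvE_cons (s : Int) (l : String) (ls : List String) :
    pvE s (l :: ls) = (if pvSep l then [s] else []) ++ pvE (s + 1) ls := by
  simp only [pvE, PySem.List.enumerate_cons, List.filter_cons]
  by_cases h : pvSep l <;> simp [h]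

theorem pvE_append (s : Int) (u v : List String) :
    pvE s (u ++ v) = pvE s u ++ pvE (s + u.length) v := by
  simp [pvE, PySem.List.enumerate_append, List.filter_append]

theorem pvE_shift : ∀ (ls : List String) (s : Int), pvE s ls = (pvE 0 ls).map (· + s) := by
  intro ls
  induction ls with
  | nil => intro s; simp [pvE]
  | cons l ls ih =>
    intro s
    rw [pvE_cons, pvE_cons, ih (s + 1), ih (0 + 1)]
    simp only [List.map_append, List.map_map]
    congr 1
    · by_cases h : pvSep l <;> simp [h]
    · apply List.map_congr_left
      intro a _
      simp
      omega

theorem pvE_free : ∀ (c : List String), (∀ l ∈ c, pvSep l = false) → ∀ s, pvE s c = [] := by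
  intro c
  induction c with
  | nil => intro _ s; simp [pvE]
  | cons y c' ih =>
    intro h s
    rw [pvE_cons]
    have hy : pvSep y = false := h y (by simp)
    simp [hy, ih (fun l hl => h l (by simp [hl]))]

theorem pvE_nonneg : ∀ (ls : List String) (s : Int), ∀ i ∈ pvE s ls, s ≤ i := by
  intro ls
  induction ls with
  | nil => intro s i hi; simp [pvE] at hi
  | cons l ls ih =>
    intro s i hi
    rw [pvE_cons] at hi
    rcases List.mem_append.mp hi with h | h
    · by_cases hl : pvSep l
      · simp [hl] at h; omega
      · simp [hl] at h
    · have := ih (s + 1) i h; omega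

theorem pvSlice_shift (pre ys : List String) (a b : Int) (ha : 0 ≤ a) (hb : 0 ≤ b) :
    PySem.List.slice (pre ++ ys) (some ((pre.length : Int) + a)) (some ((pre.length : Int) + b))
      = PySem.List.slice ys (some a) (some b) := by
  rw [PySem.List.slice_toNat _ (by omega) (by omega), PySem.List.slice_toNat _ ha hb]
  have h2 : ((pre.length : Int) + b).toNat - ((pre.length : Int) + a).toNat = b.toNat - a.toNat := by
    omega
  rw [h2]
  congr 1
  rw [List.drop_append]
  have hge : pre.length ≤ ((pre.length : Int) + a).toNat := by omega
  have hdnil : pre.drop (((pre.length : Int) + a).toNat) = [] := by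
    apply List.drop_eq_nil_of_le hge
  rw [hdnil]
  have : ((pre.length : Int) + a).toNat - pre.length = a.toNat := by omega
  rw [this]
  simp

theorem pvSlice_full (ls : List String) :
    PySem.List.slice ls (some 0) (some (ls.length : Int)) = ls := by
  have h0 : (0 : Int) = ((0 : Nat) : Int) := by norm_num
  rw [h0, PySem.List.slice_natCast]
  simp

theorem pvSlice_pre (c rest : List String) :
    PySem.List.slice (c ++ rest) (some 0) (some (c.length : Int)) = c := by
  have h0 : (0 : Int) = ((0 : Nat) : Int) := by norm_num
  rw [h0, PySem.List.slice_natCast]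
  simp

-- pvB on a separator-free line list is one chunk
theorem pvB_free (c : List String) (hc : ∀ l ∈ c, pvSep l = false) :
    pvB c = pvFlush c := by
  simp only [pvB, pvSep] at *
  rw [show ((PySem.List.enumerate c 0).filter
      (fun p => decide (PySem.Str.strip p.2 = "----------"))).map (fun p => p.1) = pvE 0 c from rfl]
  rw [pvE_free c hc 0]
  simp only [List.map_nil, List.nil_append, List.zip_cons_cons, List.zip_nil_right,
    List.map_cons, List.map_nil, List.filter]
  rw [pvSlice_full]
  simp only [pvFlush]
  split_ifs with h <;> simp_all

-- pvB splits off the chunk before the first separator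
theorem pvB_split (c : List String) (hc : ∀ l ∈ c, pvSep l = false)
    (x : String) (hx : pvSep x = true) (xs : List String) :
    pvB (c ++ x :: xs) = pvFlush c ++ pvB xs := by
  have hE : ((PySem.List.enumerate (c ++ x :: xs) 0).filter
      (fun p => decide (PySem.Str.strip p.2 = "----------"))).map (fun p => p.1)
      = pvE 0 (c ++ x :: xs) := rfl
  have hE' : ((PySem.List.enumerate xs 0).filter
      (fun p => decide (PySem.Str.strip p.2 = "----------"))).map (fun p => p.1)
      = pvE 0 xs := rfl
  simp only [pvB, hE, hE']
  have hbounds : pvE 0 (c ++ x :: xs)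
      = (c.length : Int) :: (pvE 0 xs).map (· + ((c.length : Int) + 1)) := by
    rw [pvE_append, pvE_free c hc, pvE_cons, hx]
    simp only [List.nil_append, if_true, List.singleton_append, zero_add]
    congr 1
    rw [pvE_shift xs ((c.length : Int) + 1)]
  have hlen : (((c ++ x :: xs).length : Nat) : Int) = (xs.length : Int) + ((c.length : Int) + 1) := by
    simp
    omega
  have hnonneg : ∀ p ∈ (0 :: (pvE 0 xs).map (· + 1)).zip (pvE 0 xs ++ [(xs.length : Int)]),
      0 ≤ p.1 ∧ 0 ≤ p.2 := by
    intro p hp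
    obtain ⟨hp1, hp2⟩ := List.of_mem_zip hp
    constructor
    · rcases List.mem_cons.mp hp1 with h | h
      · omega
      · obtain ⟨a, ha, h'⟩ := List.mem_map.mp h
        have := pvE_nonneg xs 0 a ha
        omega
    · rcases List.mem_append.mp hp2 with h | h
      · have := pvE_nonneg xs 0 p.2 h
        omega
      · simp at h
        omega
  have hzip : (((c.length : Int) + 1) :: ((pvE 0 xs).map (· + ((c.length : Int) + 1))).map (· + 1)).zip
        ((pvE 0 xs).map (· + ((c.length : Int) + 1)) ++ [(xs.length : Int) + ((c.length : Int) + 1)])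
      = ((0 :: (pvE 0 xs).map (· + 1)).zip (pvE 0 xs ++ [(xs.length : Int)])).map
        (Prod.map (· + ((c.length : Int) + 1)) (· + ((c.length : Int) + 1))) := by
    have hstarts : ((c.length : Int) + 1) :: ((pvE 0 xs).map (· + ((c.length : Int) + 1))).map (· + 1)
        = (0 :: (pvE 0 xs).map (· + 1)).map (· + ((c.length : Int) + 1)) := by
      simp only [List.map_cons, List.map_map, zero_add]
      congr 1
      apply List.map_congr_left
      intro a _
      simp
      omega
    have hstops : (pvE 0 xs).map (· + ((c.length : Int) + 1)) ++ [(xs.length : Int) + ((c.length : Int) + 1)]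
        = (pvE 0 xs ++ [(xs.length : Int)]).map (· + ((c.length : Int) + 1)) := by
      simp
    rw [hstarts, hstops, List.zip_map]
  have hshift : ∀ p ∈ (0 :: (pvE 0 xs).map (· + 1)).zip (pvE 0 xs ++ [(xs.length : Int)]),
      ((fun p => PySem.Str.strip (PySem.Str.join "\n" (PySem.List.slice (c ++ x :: xs)
          (some p.1) (some p.2)))) ∘
        Prod.map (· + ((c.length : Int) + 1)) (· + ((c.length : Int) + 1))) p
      = PySem.Str.strip (PySem.Str.join "\n" (PySem.List.slice xs (some p.1) (some p.2))) := by
    intro p hp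
    obtain ⟨h1, h2⟩ := hnonneg p hp
    simp only [Function.comp_apply, Prod.map_fst, Prod.map_snd]
    have hcx : c ++ x :: xs = (c ++ [x]) ++ xs := by simp
    rw [hcx]
    have e1 : p.1 + ((c.length : Int) + 1) = (((c ++ [x]).length : Nat) : Int) + p.1 := by
      simp
      omega
    have e2 : p.2 + ((c.length : Int) + 1) = (((c ++ [x]).length : Nat) : Int) + p.2 := by
      simp
      omega
    rw [e1, e2, pvSlice_shift _ _ _ _ h1 h2]
  rw [hbounds]
  simp only [List.map_cons, List.cons_append, List.zip_cons_cons, hlen, List.map_cons]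
  rw [hzip, List.map_map]
  rw [List.map_congr_left hshift]
  rw [pvSlice_pre c (x :: xs)]
  simp only [List.filter_cons, pvFlush]
  split_ifs with h <;> simp_all

-- main: A's loop on ls equals B's staged pipeline on ls
theorem pvMain : ∀ (fuel : Nat) (ls : List String), ls.length ≤ fuel →
    pvRunA ls [] = pvB ls := by
  intro fuel
  induction fuel with
  | zero =>
    intro ls hls
    have : ls = [] := List.eq_nil_of_length_eq_zero (Nat.le_zero.mp hls)
    subst this
    rw [pvB_free [] (by simp)]
    rfl
  | succ n ih =>
    intro ls hls
    set t := ls.takeWhile (fun l => !pvSep l) with ht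
    set r := ls.dropWhile (fun l => !pvSep l) with hr
    have hsplit : t ++ r = ls := List.takeWhile_append_dropWhile
    have htfree : ∀ l ∈ t, pvSep l = false := by
      intro l hl
      have := List.mem_takeWhile_imp hl
      simpa using this
    cases hcr : r with
    | nil =>
      have hlst : ls = t := by rw [← hsplit, hcr]; simp
      rw [hlst, pvB_free t htfree]
      have := pvRunA_prefix t htfree [] []
      simpa [pvRunA] using this
    | cons y ys =>
      have hy : pvSep y = true := by
        have hfind : List.find? pvSep ls = some y := by
          rw [List.find?_eq_head?_dropWhile_not, ← hr, hcr]
          rfl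
        exact List.find?_some hfind
      have hlst : ls = t ++ y :: ys := by rw [← hsplit, hcr]
      rw [hlst, pvB_split t htfree y hy ys]
      rw [pvRunA_prefix t htfree (y :: ys) []]
      simp only [List.nil_append, pvRunA, hy, if_true]
      congr 1
      apply ih
      have : ls.length = t.length + 1 + ys.length := by rw [hlst]; simp; omega
      omega

-- ===== VERDICT (by name: the statement is the Claim_ definition above) =====
theorem split_history_entries_spec : Claim_equal_split_history_entries := by
  intro content _
  unfold Spec_split_history_entries split_history_entries split_history_entries_alt
  rw [pvFinishA_foldl]
  simp only [List.nil_append]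
  exact pvMain _ _ (le_refl _)
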